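-- pv_equiv track=rewrite | github.com/shanggeshihun/Algorithm | 20190715最优解/拼团方案2.py | the_car_price_dict
-- ===== SOURCE A (Python) =====
-- def the_car_price_dict(total_car_cnt,step_1,delta_price_1,step_2,delta_price_2):
--     """
--     total_car_cnt:单个包车辆数
--     step_1:第一个区间的下界
--     delta__price_1:第一个区间递涨单价
--     step_2:第二个区间的步长
--     delta_price_2:第二个区间递涨单价
--
--     return:price={the_car_number:price} the_car_number 该团中的司机及实际运价
--     """
--     price={}
--     if total_car_cnt>=1 and total_car_cnt<=step_1:
--         step_price_1=delta_price_1*total_car_cnt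
--
--         for i in range(1,total_car_cnt+1):
--             price[i]=step_price_1
--
--     elif total_car_cnt>=1+step_1 and total_car_cnt<=step_2+step_1:
--         step_price_1=step_1*delta_price_1
--         for i in range(1,step_1+1):
--             price[i]=step_price_1
--         for i in range(step_1+1,total_car_cnt+1):
--             price[i]=step_price_1+(i-step_1)*delta_price_2
--     else:
--         pass
--     return price
-- ===== SOURCE B (Python) =====
-- def the_car_price_dict(total_car_cnt, step_1, delta_price_1, step_2, delta_price_2):
--     if 1 <= total_car_cnt <= step_1:
--         p = delta_price_1 * total_car_cnt
--     elif step_1 + 1 <= total_car_cnt <= step_1 + step_2: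
--         p = step_1 * delta_price_1 + (total_car_cnt - step_1) * delta_price_2
--     else:
--         return {}
--     # walk downward from the most expensive car, stepping the price back down
--     # by the tier-2 increment while still above the tier-1 boundary
--     pairs = []
--     for i in range(total_car_cnt, 0, -1):
--         pairs.append((i, p))
--         if i > step_1:
--             p -= delta_price_2
--     return dict(reversed(pairs))
-- ===== Notes on version B (the rewrite author's own statement) =====
-- stated objective: alternative
-- what changed: Instead of two branches with three loops each multiplying out the price per key, B computes only the top car's price and walks downward with a running accumulator, subtracting the tier-2 increment while above the tier-1 boundary, then builds the dict from the reversed pair list.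
-- intended difference: When step_1 is negative and total_car_cnt lies in the second tier (step_1+1 <= total_car_cnt <= step_1+step_2), A returns a dict containing nonpositive car numbers step_1+1..0 (an artefact of its loop bound), while B prices only the actual cars 1..total_car_cnt, which is the intended set of keys. — e.g. on the_car_price_dict(1, -1, 2, 3, 5): A returns [(0, 3), (1, 8)], B returns [(1, 8)]
import Mathlib
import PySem

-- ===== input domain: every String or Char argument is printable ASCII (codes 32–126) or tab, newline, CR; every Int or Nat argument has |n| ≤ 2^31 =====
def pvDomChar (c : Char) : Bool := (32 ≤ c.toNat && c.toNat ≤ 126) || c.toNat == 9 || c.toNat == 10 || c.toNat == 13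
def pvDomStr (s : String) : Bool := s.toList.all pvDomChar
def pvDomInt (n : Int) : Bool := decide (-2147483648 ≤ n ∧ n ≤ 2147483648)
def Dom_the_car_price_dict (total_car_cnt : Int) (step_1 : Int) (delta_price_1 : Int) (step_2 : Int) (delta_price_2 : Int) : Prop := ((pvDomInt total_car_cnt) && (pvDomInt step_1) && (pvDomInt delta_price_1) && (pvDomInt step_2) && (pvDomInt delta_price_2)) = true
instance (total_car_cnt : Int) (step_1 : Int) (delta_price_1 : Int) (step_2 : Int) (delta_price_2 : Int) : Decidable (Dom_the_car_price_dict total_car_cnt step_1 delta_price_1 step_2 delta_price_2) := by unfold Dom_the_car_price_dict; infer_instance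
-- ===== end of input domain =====

-- B computes only the top car's price and walks downward with a running accumulator
-- (subtracting the tier-2 increment while above the tier-1 boundary), instead of A's
-- two branches with three per-key multiplication loops (objective: alternative).

-- ===== PORT A =====
def the_car_price_dict (total_car_cnt : Int) (step_1 : Int) (delta_price_1 : Int) (step_2 : Int) (delta_price_2 : Int) : List (Int × Int) :=
  let price : PySem.Dict Int Int := PySem.Dict.empty
  if total_car_cnt ≥ 1 ∧ total_car_cnt ≤ step_1 then
    let step_price_1 := delta_price_1 * total_car_cnt
    let price := (PySem.List.pyRange 1 (total_car_cnt + 1) 1).foldl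
      (fun d i => d.insert i step_price_1) price
    price.items
  else if total_car_cnt ≥ 1 + step_1 ∧ total_car_cnt ≤ step_2 + step_1 then
    let step_price_1 := step_1 * delta_price_1
    let price := (PySem.List.pyRange 1 (step_1 + 1) 1).foldl
      (fun d i => d.insert i step_price_1) price
    let price := (PySem.List.pyRange (step_1 + 1) (total_car_cnt + 1) 1).foldl
      (fun d i => d.insert i (step_price_1 + (i - step_1) * delta_price_2)) price
    price.items
  else
    price.items

-- ===== PORT B =====
-- the downward walk: pairs collected highest car first, then dict(reversed(pairs))
def bLoop (total_car_cnt : Int) (step_1 : Int) (delta_price_2 : Int) (p : Int) : List (Int × Int) :=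
  ((((PySem.List.pyRange total_car_cnt 0 (-1)).foldl
      (fun (st : List (Int × Int) × Int) i =>
        (st.1 ++ [(i, st.2)], if step_1 < i then st.2 - delta_price_2 else st.2))
      ([], p)).1.reverse).foldl (fun d q => d.insert q.1 q.2)
    (PySem.Dict.empty : PySem.Dict Int Int)).items

def the_car_price_dict_alt (total_car_cnt : Int) (step_1 : Int) (delta_price_1 : Int) (step_2 : Int) (delta_price_2 : Int) : List (Int × Int) :=
  if 1 ≤ total_car_cnt ∧ total_car_cnt ≤ step_1 then
    bLoop total_car_cnt step_1 delta_price_2 (delta_price_1 * total_car_cnt)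
  else if step_1 + 1 ≤ total_car_cnt ∧ total_car_cnt ≤ step_1 + step_2 then
    bLoop total_car_cnt step_1 delta_price_2
      (step_1 * delta_price_1 + (total_car_cnt - step_1) * delta_price_2)
  else []

-- ===== PRECONDITION & SPEC =====
-- When step_1 is negative and total_car_cnt lies in the second tier, A's second loop
-- starts at step_1+1, so A returns a dict containing nonpositive car numbers — an
-- artefact of its loop bound; B prices only the actual cars 1..total_car_cnt, the
-- intended key set.
def D_the_car_price_dict (total_car_cnt : Int) (step_1 : Int) (delta_price_1 : Int) (step_2 : Int) (delta_price_2 : Int) : Prop :=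
  step_1 ≤ -1 ∧ step_1 < total_car_cnt ∧ total_car_cnt - step_2 ≤ step_1
instance (total_car_cnt : Int) (step_1 : Int) (delta_price_1 : Int) (step_2 : Int) (delta_price_2 : Int) : Decidable (D_the_car_price_dict total_car_cnt step_1 delta_price_1 step_2 delta_price_2) := by unfold D_the_car_price_dict; infer_instance

def Spec_the_car_price_dict (total_car_cnt : Int) (step_1 : Int) (delta_price_1 : Int) (step_2 : Int) (delta_price_2 : Int) (out : List (Int × Int)) : Prop := ¬ D_the_car_price_dict total_car_cnt step_1 delta_price_1 step_2 delta_price_2 → out = the_car_price_dict_alt total_car_cnt step_1 delta_price_1 step_2 delta_price_2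
instance (total_car_cnt : Int) (step_1 : Int) (delta_price_1 : Int) (step_2 : Int) (delta_price_2 : Int) (out : List (Int × Int)) : Decidable (Spec_the_car_price_dict total_car_cnt step_1 delta_price_1 step_2 delta_price_2 out) := by unfold Spec_the_car_price_dict; infer_instance

def pvDiffWitness_the_car_price_dict : Int × Int × Int × Int × Int := (1, -1, 2, 3, 5)
def pvDiffWitnessOut_the_car_price_dict : (List (Int × Int)) × (List (Int × Int)) := ([(0, 3), (1, 8)], [(1, 8)])

-- ===== CLAIM (what is proved, stated in full; the proofs are below) =====
def Claim_unchanged_the_car_price_dict : Prop := ∀ (total_car_cnt : Int) (step_1 : Int) (delta_price_1 : Int) (step_2 : Int) (delta_price_2 : Int), Dom_the_car_price_dict total_car_cnt step_1 delta_price_1 step_2 delta_price_2 → Spec_the_car_price_dict total_car_cnt step_1 delta_price_1 step_2 delta_price_2 (the_car_price_dict total_car_cnt step_1 delta_price_1 step_2 delta_price_2)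
def Claim_changed_the_car_price_dict : Prop := Dom_the_car_price_dict (pvDiffWitness_the_car_price_dict.1) (pvDiffWitness_the_car_price_dict.2.1) (pvDiffWitness_the_car_price_dict.2.2.1) (pvDiffWitness_the_car_price_dict.2.2.2.1) (pvDiffWitness_the_car_price_dict.2.2.2.2) ∧ D_the_car_price_dict (pvDiffWitness_the_car_price_dict.1) (pvDiffWitness_the_car_price_dict.2.1) (pvDiffWitness_the_car_price_dict.2.2.1) (pvDiffWitness_the_car_price_dict.2.2.2.1) (pvDiffWitness_the_car_price_dict.2.2.2.2) ∧ the_car_price_dict (pvDiffWitness_the_car_price_dict.1) (pvDiffWitness_the_car_price_dict.2.1) (pvDiffWitness_the_car_price_dict.2.2.1) (pvDiffWitness_the_car_price_dict.2.2.2.1) (pvDiffWitness_the_car_price_dict.2.2.2.2) = pvDiffWitnessOut_the_car_price_dict.1 ∧ the_car_price_dict_alt (pvDiffWitness_the_car_price_dict.1) (pvDiffWitness_the_car_price_dict.2.1) (pvDiffWitness_the_car_price_dict.2.2.1) (pvDiffWitness_the_car_price_dict.2.2.2.1) (pvDiffWitness_the_car_price_dict.2.2.2.2) = pvDiffWitnessOut_the_car_price_dict.2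 ∧ pvDiffWitnessOut_the_car_price_dict.1 ≠ pvDiffWitnessOut_the_car_price_dict.2
def Claim_exact_the_car_price_dict : Prop := ∀ (total_car_cnt : Int) (step_1 : Int) (delta_price_1 : Int) (step_2 : Int) (delta_price_2 : Int), Dom_the_car_price_dict total_car_cnt step_1 delta_price_1 step_2 delta_price_2 → D_the_car_price_dict total_car_cnt step_1 delta_price_1 step_2 delta_price_2 → the_car_price_dict total_car_cnt step_1 delta_price_1 step_2 delta_price_2 ≠ the_car_price_dict_alt total_car_cnt step_1 delta_price_1 step_2 delta_price_2

-- ===== LEMMAS AND PROOFS =====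

-- a fold inserting the distinct fresh keys of a range into the empty dict appends them in order
theorem items_fold_range_empty (a b : Int) (v : Int → Int) :
    ((PySem.List.pyRange a b 1).foldl (fun d i => d.insert i (v i))
      (PySem.Dict.empty : PySem.Dict Int Int)).items
      = (PySem.List.pyRange a b 1).map (fun i => (i, v i)) := by
  have h := PySem.Dict.items_foldl_insert_fresh (l := PySem.List.pyRange a b 1)
    (k := fun i => i) (v := v) (d := (PySem.Dict.empty : PySem.Dict Int Int))
    (by intro x _; exact PySem.Dict.contains_empty x)
    (by simpa using PySem.List.nodup_pyRange_one a b)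
  simpa using h

-- the downward accumulator walk collects exactly (i, f i) when the start value is f a
-- and f obeys the step recurrence
theorem bfold_fst (step_1 delta_price_2 : Int) (f : Int → Int) :
    ∀ (n : Nat) (a : Int), a.toNat = n →
      (∀ i : Int, 1 < i → i ≤ a →
        (if step_1 < i then f i - delta_price_2 else f i) = f (i - 1)) →
      ∀ (acc : List (Int × Int)),
      ((PySem.List.pyRange a 0 (-1)).foldl
        (fun (st : List (Int × Int) × Int) i =>
          (st.1 ++ [(i, st.2)], if step_1 < i then st.2 - delta_price_2 else st.2))
        (acc, f a)).1
      = acc ++ (PySem.List.pyRange a 0 (-1)).map (fun i => (i, f i)) := by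
  intro n
  induction n with
  | zero =>
    intro a ha _ acc
    rw [PySem.List.pyRange_neg_one_eq_nil (by omega)]
    simp
  | succ m ih =>
    intro a ha hf acc
    have hpos : (0 : Int) < a := by omega
    rw [PySem.List.pyRange_neg_one_cons hpos]
    simp only [List.foldl_cons, List.map_cons]
    by_cases h1 : (1 : Int) < a
    · have hstep := hf a h1 le_rfl
      rw [hstep]
      have := ih (a - 1) (by omega) (fun i hi1 hi2 => hf i hi1 (by omega))
        (acc ++ [(a, f a)])
      simpa using this
    · have ha1 : a = 1 := by omega
      subst ha1
      rw [PySem.List.pyRange_neg_one_eq_nil (by omega)]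
      simp

-- bLoop started at f total_car_cnt produces the ascending table of f
theorem bLoop_items (total_car_cnt step_1 delta_price_2 : Int) (f : Int → Int)
    (hf : ∀ i : Int, 1 < i → i ≤ total_car_cnt →
      (if step_1 < i then f i - delta_price_2 else f i) = f (i - 1)) :
    bLoop total_car_cnt step_1 delta_price_2 (f total_car_cnt)
      = (PySem.List.pyRange 1 (total_car_cnt + 1) 1).map (fun i => (i, f i)) := by
  unfold bLoop
  rw [bfold_fst step_1 delta_price_2 f total_car_cnt.toNat total_car_cnt rfl hf []]
  simp only [List.nil_append]
  rw [PySem.List.pyRange_neg_one_eq_reverse]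
  rw [← List.map_reverse, List.reverse_reverse]
  have h := PySem.Dict.items_foldl_insert_fresh
    (l := (PySem.List.pyRange 1 (total_car_cnt + 1) 1).map (fun i => (i, f i)))
    (k := fun q => q.1) (v := fun q => q.2)
    (d := (PySem.Dict.empty : PySem.Dict Int Int))
    (by intro x _; exact PySem.Dict.contains_empty _)
    (by
      simp only [List.map_map]
      simpa [Function.comp_def] using PySem.List.nodup_pyRange_one 1 (total_car_cnt + 1))
  simp only [Prod.mk.eta, List.map_id'] at h
  simp only [zero_add]
  rw [h]
  rfl

-- ===== VERDICT =====
theorem the_car_price_dict_spec : Claim_unchanged_the_car_price_dict := by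
  intro t s1 d1 s2 d2 _ hD
  unfold the_car_price_dict the_car_price_dict_alt
  by_cases h1 : t ≥ 1 ∧ t ≤ s1
  · rw [if_pos h1, if_pos ⟨h1.1, h1.2⟩]
    rw [items_fold_range_empty]
    have hB := bLoop_items t s1 d2 (fun _ => d1 * t)
      (by intro i _ hi2; rw [if_neg (by omega : ¬ s1 < i)])
    simp only at hB
    rw [hB]
  · by_cases h2 : t ≥ 1 + s1 ∧ t ≤ s2 + s1
    · have hs1 : 0 ≤ s1 := by
        by_contra hneg
        exact hD ⟨by omega, by omega, by omega⟩
      rw [if_neg h1, if_pos h2, if_neg (by omega : ¬ (1 ≤ t ∧ t ≤ s1)),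
          if_pos (by constructor <;> omega)]
      -- A's dict: first loop over [1, s1+1), then fresh keys [s1+1, t+1)
      have hfresh : ∀ x ∈ PySem.List.pyRange (s1 + 1) (t + 1) 1,
          ((PySem.List.pyRange 1 (s1 + 1) 1).foldl
            (fun d i => d.insert i (s1 * d1))
            (PySem.Dict.empty : PySem.Dict Int Int)).contains x = false := by
        intro x hx
        rw [PySem.List.mem_pyRange_one] at hx
        rw [PySem.Dict.contains_eq_decide_mem_keys, PySem.Dict.keys_foldl_insert]
        simp only [decide_eq_false_iff_not, PySem.Set.mem_update,
          PySem.Dict.keys_empty, List.not_mem_nil, false_or,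
          PySem.List.mem_pyRange_one]
        omega
      have hA := PySem.Dict.items_foldl_insert_fresh
        (l := PySem.List.pyRange (s1 + 1) (t + 1) 1) (k := fun i => i)
        (v := fun i => s1 * d1 + (i - s1) * d2)
        (d := (PySem.List.pyRange 1 (s1 + 1) 1).foldl
          (fun d i => d.insert i (s1 * d1))
          (PySem.Dict.empty : PySem.Dict Int Int))
        (by simpa using hfresh)
        (by simpa using PySem.List.nodup_pyRange_one (s1 + 1) (t + 1))
      simp only at hA
      rw [hA, items_fold_range_empty]
      -- B: the walk realises f i = s1*d1 + max (i - s1) 0 * d2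
      have hB := bLoop_items t s1 d2 (fun i => s1 * d1 + max (i - s1) 0 * d2)
        (by
          intro i hi _
          by_cases hc : s1 < i
          · rw [if_pos hc]
            have h1 : max (i - s1) 0 = i - s1 := by omega
            have h2 : max (i - 1 - s1) 0 = i - 1 - s1 := by omega
            simp only [h1, h2]
            ring
          · rw [if_neg hc]
            have h1 : max (i - s1) 0 = 0 := by omega
            have h2 : max (i - 1 - s1) 0 = 0 := by omega
            simp only [h1, h2])
      simp only at hB
      have hstart : s1 * d1 + (t - s1) * d2 = s1 * d1 + max (t - s1) 0 * d2 := by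
        have : max (t - s1) 0 = t - s1 := by omega
        rw [this]
      rw [hstart, hB]
      -- split B's range at s1 + 1 and match piecewise
      rw [PySem.List.pyRange_one_append 1 (s1 + 1) (t + 1) (by omega) (by omega),
          List.map_append]
      congr 1
      · apply List.map_congr_left
        intro i hi
        rw [PySem.List.mem_pyRange_one] at hi
        have : max (i - s1) 0 = 0 := by omega
        rw [this]
        ring_nf
      · apply List.map_congr_left
        intro i hi
        rw [PySem.List.mem_pyRange_one] at hi
        have : max (i - s1) 0 = i - s1 := by omega
        rw [this]
    · rw [if_neg h1, if_neg h2, if_neg (by omega : ¬ (1 ≤ t ∧ t ≤ s1)),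
          if_neg (by omega : ¬ (s1 + 1 ≤ t ∧ t ≤ s1 + s2))]
      rfl

theorem the_car_price_dict_changed : Claim_changed_the_car_price_dict := by
  unfold Claim_changed_the_car_price_dict; decide

theorem the_car_price_dict_tight : Claim_exact_the_car_price_dict := by
  intro t s1 d1 s2 d2 _ hD
  obtain ⟨hs1, hlo, hhi⟩ := hD
  unfold the_car_price_dict the_car_price_dict_alt
  rw [if_neg (by omega : ¬ (t ≥ 1 ∧ t ≤ s1)), if_pos (by constructor <;> omega),
      if_neg (by omega : ¬ (1 ≤ t ∧ t ≤ s1)), if_pos (by constructor <;> omega)]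
  simp only
  rw [PySem.List.pyRange_one_eq_nil (by omega : s1 + 1 ≤ 1)]
  simp only [List.foldl_nil]
  rw [items_fold_range_empty]
  have hB := bLoop_items t s1 d2 (fun i => s1 * d1 + max (i - s1) 0 * d2)
    (by
      intro i hi _
      by_cases hc : s1 < i
      · rw [if_pos hc]
        have h1 : max (i - s1) 0 = i - s1 := by omega
        have h2 : max (i - 1 - s1) 0 = i - 1 - s1 := by omega
        simp only [h1, h2]
        ring
      · rw [if_neg hc]
        have h1 : max (i - s1) 0 = 0 := by omega
        have h2 : max (i - 1 - s1) 0 = 0 := by omega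
        simp only [h1, h2])
  simp only at hB
  have hstart : s1 * d1 + (t - s1) * d2 = s1 * d1 + max (t - s1) 0 * d2 := by
    have : max (t - s1) 0 = t - s1 := by omega
    rw [this]
  rw [hstart, hB]
  intro heq
  have := congrArg List.length heq
  simp only [List.length_map, PySem.List.length_pyRange_one] at this
  omega
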